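-- pv_equiv track=rewrite | github.com/JoeJimFlood/SportPredictifier | SportPredictifier/matrix.py | __allocate_matchups
-- ===== SOURCE A (Python) =====
-- def __get_allocated_teams(matchups):
--     '''
--     Obtains list of teams within matchups. This is used to prevent matchups with the same team from being allocated into the round.
--
--     Parameters
--     ----------
--     matchups (list):
--         List of length-4 tuples indicating each team, the venue, and a collection of all teams
--
--     Returns
--     -------
--     allocated_teams (list):
--         List of codes for teams that are present in the matchup
--     '''
--     allocated_teams = []
--     for matchup in matchups:
--         allocated_teams.append(matchup[0])
--         allocated_teams.append(matchup[1])
--     return allocated_teams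
--
-- def __allocate_matchups(matchups, roundno = 0):
--     '''
--     Allocates the matchups to different rounds so that games can be simulated in parallel, but one team won't be in multiple simulations in the same round.
--
--     Paramters
--     ---------
--     matchups (list):
--         List of length-4 tuples indicating each team, the venue, and a collection of all teams
--     roundno (int):
--         Round number to start labeling at
--
--     Returns
--     -------
--     matchups_by_round (dict):
--         A dictionary where the key is the round number and the values are a list of matchups allocated to that round
--     '''
--     matchups_by_round = {}
--     while len(matchups) > 0:
--         matchups_by_round[roundno] = []
--         for matchup in matchups:
--             allocated_teams = __get_allocated_teams(matchups_by_round[roundno])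
--             if matchup[0] in allocated_teams or matchup[1] in allocated_teams:
--                 continue
--             matchups_by_round[roundno].append(matchup)
--
--         for matchup in matchups_by_round[roundno]:
--             matchups.remove(matchup)
--
--         roundno += 1
--
--     return matchups_by_round
-- ===== SOURCE B (Python) =====
-- def __allocate_matchups(matchups, roundno = 0):
--     """One-pass first-fit allocation: keep (games, team-set) per round; place each
--     matchup into the first round whose team-set is free of both its teams."""
--     rounds = []
--     for m in matchups:
--         for games, teams in rounds:
--             if m[0] not in teams and m[1] not in teams:
--                 games.append(m)
--                 teams.add(m[0])
--                 teams.add(m[1])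
--                 break
--         else:
--             rounds.append(([m], {m[0], m[1]}))
--     matchups.clear()
--     return {roundno + i: games for i, (games, _) in enumerate(rounds)}
-- ===== Notes on version B (the rewrite author's own statement) =====
-- stated objective: faster
-- what changed: Replaces A's round-by-round rescan of the remaining list (rebuilding the allocated-teams list per matchup and emptying the input with repeated .remove) by a single pass over the matchups that first-fit places each matchup into the earliest round whose maintained team-set is free of both its teams.
import Mathlib
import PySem

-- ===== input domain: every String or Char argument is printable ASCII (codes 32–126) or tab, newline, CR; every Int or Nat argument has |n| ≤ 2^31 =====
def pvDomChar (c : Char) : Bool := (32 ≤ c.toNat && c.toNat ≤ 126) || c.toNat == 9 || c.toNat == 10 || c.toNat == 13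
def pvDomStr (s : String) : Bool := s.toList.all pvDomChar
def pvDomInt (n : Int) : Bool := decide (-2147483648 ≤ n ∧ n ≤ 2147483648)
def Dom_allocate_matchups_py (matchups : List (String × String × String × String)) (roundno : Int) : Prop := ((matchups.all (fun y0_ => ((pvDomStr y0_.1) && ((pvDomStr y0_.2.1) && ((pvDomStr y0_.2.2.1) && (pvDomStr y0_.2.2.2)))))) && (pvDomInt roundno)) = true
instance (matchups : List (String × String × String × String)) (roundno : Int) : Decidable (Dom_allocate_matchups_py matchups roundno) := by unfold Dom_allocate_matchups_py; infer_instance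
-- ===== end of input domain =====

-- B replaces A's quadratic round-by-round rescan with a one-pass first-fit allocation
-- keeping one team-set per round (objective: alternative/simpler decomposition).
-- NOTE on side effects: Python A empties `matchups` in place via .remove; Python B
-- reproduces that with matchups.clear(); the Lean equivalence is about the return value.

abbrev M4 := String × String × String × String

-- ===== PORT A =====
-- __get_allocated_teams: append both team codes of each matchup
def teamsA (ms : List M4) : List String :=
  ms.foldl (fun acc m => acc ++ [m.1, m.2.1]) []

-- one step of the inner `for matchup in matchups` selection loop
def roundStepA (round : List M4) (m : M4) : List M4 :=
  let allocated := teamsA round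
  if allocated.contains m.1 || allocated.contains m.2.1 then round else round ++ [m]

-- the inner for loop: matchups_by_round[roundno] built by selection
def buildRoundA (ms : List M4) : List M4 :=
  ms.foldl roundStepA []

-- `for matchup in matchups_by_round[roundno]: matchups.remove(matchup)`
-- (remove? never returns none here: each round member is in the list; getD is for totality)
def removeAllA (ms round : List M4) : List M4 :=
  round.foldl (fun cur m => (PySem.List.remove? cur m).getD cur) ms

-- termination facts for the while loop (cited by `decreasing_by` below)
theorem removeAllA_len_le : ∀ (round ms : List M4), (removeAllA ms round).length ≤ ms.length
  | [], _ => le_refl _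
  | v :: L, ms => by
      have h1 : ((PySem.List.remove? ms v).getD ms).length ≤ ms.length := by
        cases hv : PySem.List.remove? ms v with
        | none => simp
        | some r =>
            have hm : v ∈ ms := by
              by_contra hn
              rw [← PySem.List.remove?_eq_none_iff (xs := ms) (v := v)] at hn
              simp [hn] at hv
            rw [PySem.List.remove?_eq_some_erase ms v hm] at hv
            cases hv
            simp [hm]
      have h2 := removeAllA_len_le L ((PySem.List.remove? ms v).getD ms)
      have : removeAllA ms (v :: L) = removeAllA ((PySem.List.remove? ms v).getD ms) L := rfl
      rw [this]; exact le_trans h2 h1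

theorem foldl_roundStepA_prefix : ∀ (t g : List M4), ∃ s, t.foldl roundStepA g = g ++ s
  | [], g => ⟨[], by simp⟩
  | m :: t, g => by
      show ∃ s, t.foldl roundStepA (roundStepA g m) = g ++ s
      by_cases h : ((teamsA g).contains m.1 || (teamsA g).contains m.2.1) = true
      · have hstep : roundStepA g m = g := by simp only [roundStepA]; rw [if_pos h]
        rw [hstep]; exact foldl_roundStepA_prefix t g
      · have hstep : roundStepA g m = g ++ [m] := by simp only [roundStepA]; rw [if_neg h]
        rw [hstep]
        rcases foldl_roundStepA_prefix t (g ++ [m]) with ⟨s, hs⟩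
        exact ⟨m :: s, by rw [hs, List.append_assoc]; rfl⟩

theorem buildRoundA_cons (m : M4) (t : List M4) : ∃ s, buildRoundA (m :: t) = m :: s := by
  have h0 : roundStepA [] m = [m] := by simp [roundStepA, teamsA]
  have : buildRoundA (m :: t) = t.foldl roundStepA [m] := by
    simp [buildRoundA, List.foldl_cons, h0]
  rcases foldl_roundStepA_prefix t [m] with ⟨s, hs⟩
  exact ⟨s, by rw [this, hs]; rfl⟩

theorem removeAll_buildRound_lt (m : M4) (t : List M4) :
    (removeAllA (m :: t) (buildRoundA (m :: t))).length < (m :: t).length := by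
  rcases buildRoundA_cons m t with ⟨s, hs⟩
  rw [hs]
  have h1 : removeAllA (m :: t) (m :: s) = removeAllA t s := by
    simp [removeAllA, List.foldl_cons]
  rw [h1]
  have := removeAllA_len_le s t
  simp only [List.length_cons]
  omega

-- the while loop: one round per iteration, roundno += 1
def allocLoopA : List M4 → Int → List (Int × List M4)
  | [], _ => []
  | m :: t, r =>
      (r, buildRoundA (m :: t)) :: allocLoopA (removeAllA (m :: t) (buildRoundA (m :: t))) (r + 1)
termination_by ms _ => ms.length
decreasing_by exact removeAll_buildRound_lt m t

def allocate_matchups_py (matchups : List (String × String × String × String)) (roundno : Int) : List (Int × List (String × String × String × String)) :=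
  allocLoopA matchups roundno

-- ===== PORT B =====
-- first-fit insertion of one matchup into the list of (games, team-set) rounds
def altInsert (m : M4) : List (List M4 × PySem.Set String) → List (List M4 × PySem.Set String)
  | [] => [([m], PySem.Set.ofList [m.1, m.2.1])]
  | (games, teams) :: rs =>
      if !(PySem.Set.contains teams m.1) && !(PySem.Set.contains teams m.2.1) then
        (games ++ [m], PySem.Set.add (PySem.Set.add teams m.1) m.2.1) :: rs
      else
        (games, teams) :: altInsert m rs

def allocate_matchups_py_alt (matchups : List (String × String × String × String)) (roundno : Int) : List (Int × List (String × String × String × String)) :=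
  let rounds := matchups.foldl (fun rs m => altInsert m rs) []
  (PySem.List.enumerate rounds 0).map (fun p => (roundno + p.1, p.2.1))

-- ===== PRECONDITION & SPEC =====
def Spec_allocate_matchups_py (matchups : List (String × String × String × String)) (roundno : Int) (out : List (Int × List (String × String × String × String))) : Prop := out = allocate_matchups_py_alt matchups roundno
instance (matchups : List (String × String × String × String)) (roundno : Int) (out : List (Int × List (String × String × String × String))) : Decidable (Spec_allocate_matchups_py matchups roundno out) := by unfold Spec_allocate_matchups_py; infer_instance

-- ===== CLAIM (what is proved, stated in full; the proofs are below) =====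
def Claim_equal_allocate_matchups_py : Prop := ∀ (matchups : List (String × String × String × String)) (roundno : Int), Dom_allocate_matchups_py matchups roundno → Spec_allocate_matchups_py matchups roundno (allocate_matchups_py matchups roundno)

-- ===== LEMMAS AND PROOFS =====

-- the conflict test of both programs, as one Bool
def conflictB (m : M4) (g : List M4) : Bool :=
  (teamsA g).contains m.1 || (teamsA g).contains m.2.1

theorem roundStepA_eq (g : List M4) (m : M4) :
    roundStepA g m = if conflictB m g then g else g ++ [m] := rfl

-- the team set a round's games generate
def tset (g : List M4) : PySem.Set String := PySem.Set.ofList (teamsA g)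

def stateOf (gs : List (List M4)) : List (List M4 × PySem.Set String) :=
  gs.map (fun g => (g, tset g))

-- B's rounds, with the sets stripped off (pure-list model)
def insertG (m : M4) : List (List M4) → List (List M4)
  | [] => [[m]]
  | g :: gs => if conflictB m g then g :: insertG m gs else (g ++ [m]) :: gs

-- the unselected remainder of A's inner scan, and the newly selected part
def prest (g : List M4) : List M4 → List M4
  | [] => []
  | m :: t => if conflictB m g then m :: prest g t else prest (g ++ [m]) t

def selDelta (g : List M4) : List M4 → List M4
  | [] => []
  | m :: t => if conflictB m g then selDelta g t else m :: selDelta (g ++ [m]) t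

-- A's sequence of rounds, without numbering
def roundsA : List M4 → List (List M4)
  | [] => []
  | m :: t => buildRoundA (m :: t) :: roundsA (removeAllA (m :: t) (buildRoundA (m :: t)))
termination_by ms => ms.length
decreasing_by exact removeAll_buildRound_lt m t

theorem teamsA_append (g : List M4) (m : M4) :
    teamsA (g ++ [m]) = teamsA g ++ [m.1, m.2.1] := by
  simp [teamsA, List.foldl_append]

theorem tset_append (g : List M4) (m : M4) :
    tset (g ++ [m]) = PySem.Set.add (PySem.Set.add (tset g) m.1) m.2.1 := by
  have h : teamsA g ++ [m.1, m.2.1] = (teamsA g ++ [m.1]) ++ [m.2.1] := by simp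
  rw [tset, teamsA_append, h, PySem.Set.ofList_append_singleton, PySem.Set.ofList_append_singleton]
  rfl

theorem contains_tset (g : List M4) (x : String) :
    PySem.Set.contains (tset g) x = (teamsA g).contains x := by
  apply Bool.coe_iff_coe.mp
  rw [PySem.Set.contains_iff]
  simp [tset, PySem.Set.mem_ofList]

theorem altCond_eq (m : M4) (g : List M4) :
    (!(PySem.Set.contains (tset g) m.1) && !(PySem.Set.contains (tset g) m.2.1)) = !conflictB m g := by
  rw [contains_tset, contains_tset, conflictB]
  cases (teamsA g).contains m.1 <;> cases (teamsA g).contains m.2.1 <;> rfl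

theorem altInsert_stateOf (m : M4) : ∀ gs : List (List M4),
    altInsert m (stateOf gs) = stateOf (insertG m gs)
  | [] => by
      simp [altInsert, insertG, stateOf, tset, teamsA]
  | g :: gs => by
      show altInsert m ((g, tset g) :: stateOf gs) = stateOf (insertG m (g :: gs))
      rw [altInsert, altCond_eq]
      cases h : conflictB m g with
      | true =>
          rw [if_neg (by simp)]
          rw [altInsert_stateOf m gs]
          simp [insertG, h, stateOf]
      | false =>
          rw [if_pos (by simp)]
          rw [← tset_append]
          simp [insertG, h, stateOf]

theorem foldl_alt_state : ∀ (ms : List M4) (gs : List (List M4)),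
    ms.foldl (fun rs m => altInsert m rs) (stateOf gs)
      = stateOf (ms.foldl (fun gs m => insertG m gs) gs)
  | [], gs => rfl
  | m :: ms, gs => by
      simp only [List.foldl_cons]
      rw [altInsert_stateOf m gs]
      exact foldl_alt_state ms (insertG m gs)

theorem L1 : ∀ (t : List M4) (g : List M4) (gs : List (List M4)),
    t.foldl (fun gs m => insertG m gs) (g :: gs)
      = (t.foldl roundStepA g) :: ((prest g t).foldl (fun gs m => insertG m gs) gs)
  | [], g, gs => rfl
  | m :: t, g, gs => by
      simp only [List.foldl_cons]
      cases h : conflictB m g with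
      | true =>
          have hi : insertG m (g :: gs) = g :: insertG m gs := by simp [insertG, h]
          rw [hi, L1 t g (insertG m gs)]
          have hr : roundStepA g m = g := by rw [roundStepA_eq, h]; rfl
          have hp : prest g (m :: t) = m :: prest g t := by simp [prest, h]
          rw [hr, hp]
          rfl
      | false =>
          have hi : insertG m (g :: gs) = (g ++ [m]) :: gs := by simp [insertG, h]
          rw [hi, L1 t (g ++ [m]) gs]
          have hr : roundStepA g m = g ++ [m] := by rw [roundStepA_eq, h]; rfl
          have hp : prest g (m :: t) = prest (g ++ [m]) t := by simp [prest, h]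
          rw [hr, hp]

theorem conflict_mono (m : M4) (g : List M4) (v : M4)
    (h : conflictB m g = true) : conflictB m (g ++ [v]) = true := by
  simp [conflictB, teamsA_append] at h ⊢
  tauto

theorem selDelta_ne : ∀ (t : List M4) (g : List M4) (m : M4),
    conflictB m g = true → ∀ v ∈ selDelta g t, v ≠ m
  | [], _, _, _, v, hv => by simp [selDelta] at hv
  | w :: t, g, m, h, v, hv => by
      by_cases hw : conflictB w g = true
      · rw [show selDelta g (w :: t) = selDelta g t by simp [selDelta, hw]] at hv
        exact selDelta_ne t g m h v hv
      · rw [show selDelta g (w :: t) = w :: selDelta (g ++ [w]) t by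
          simp [selDelta, Bool.eq_false_iff.mpr hw]] at hv
        rcases List.mem_cons.mp hv with rfl | hv
        · intro he; rw [he] at hw; exact hw h
        · exact selDelta_ne t (g ++ [w]) m (conflict_mono m g w h) v hv

theorem removeAll_skip : ∀ (L : List M4) (t : List M4) (m : M4),
    (∀ v ∈ L, v ≠ m) → removeAllA (m :: t) L = m :: removeAllA t L
  | [], _, _, _ => rfl
  | v :: L, t, m, h => by
      have hvm : m ≠ v := fun he => (h v (by simp)) he.symm
      have hstep : PySem.List.remove? (m :: t) v = (PySem.List.remove? t v).map (m :: ·) :=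
        PySem.List.remove?_cons_of_ne t hvm
      have h1 : removeAllA (m :: t) (v :: L)
          = removeAllA ((PySem.List.remove? (m :: t) v).getD (m :: t)) L := rfl
      have h2 : removeAllA t (v :: L) = removeAllA ((PySem.List.remove? t v).getD t) L := rfl
      rw [h1, h2, hstep]
      cases hr : PySem.List.remove? t v with
      | none => simp only [Option.map_none, Option.getD_none]
                exact removeAll_skip L t m (fun x hx => h x (by simp [hx]))
      | some r => simp only [Option.map_some, Option.getD_some]
                  exact removeAll_skip L r m (fun x hx => h x (by simp [hx]))

theorem removeAll_selDelta : ∀ (t : List M4) (g : List M4),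
    removeAllA t (selDelta g t) = prest g t
  | [], g => rfl
  | m :: t, g => by
      by_cases h : conflictB m g = true
      · rw [show selDelta g (m :: t) = selDelta g t by simp [selDelta, h],
            show prest g (m :: t) = m :: prest g t by simp [prest, h],
            removeAll_skip (selDelta g t) t m (selDelta_ne t g m h)]
        rw [removeAll_selDelta t g]
      · have h' := Bool.eq_false_iff.mpr h
        rw [show selDelta g (m :: t) = m :: selDelta (g ++ [m]) t by simp [selDelta, h'],
            show prest g (m :: t) = prest (g ++ [m]) t by simp [prest, h']]
        have h1 : removeAllA (m :: t) (m :: selDelta (g ++ [m]) t)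
            = removeAllA t (selDelta (g ++ [m]) t) := by
          simp [removeAllA, List.foldl_cons]
        rw [h1, removeAll_selDelta t (g ++ [m])]

theorem sel_eq : ∀ (t : List M4) (g : List M4),
    t.foldl roundStepA g = g ++ selDelta g t
  | [], g => by simp [selDelta]
  | m :: t, g => by
      simp only [List.foldl_cons, roundStepA_eq]
      cases h : conflictB m g with
      | true => rw [if_pos rfl, show selDelta g (m :: t) = selDelta g t by simp [selDelta, h]]
                exact sel_eq t g
      | false =>
          rw [if_neg (by simp), show selDelta g (m :: t) = m :: selDelta (g ++ [m]) t by simp [selDelta, h]]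
          rw [sel_eq t (g ++ [m])]
          simp
  
theorem prest_len_le : ∀ (t : List M4) (g : List M4), (prest g t).length ≤ t.length
  | [], _ => le_refl _
  | m :: t, g => by
      by_cases h : conflictB m g = true
      · rw [show prest g (m :: t) = m :: prest g t by simp [prest, h]]
        simpa using prest_len_le t g
      · rw [show prest g (m :: t) = prest (g ++ [m]) t by simp [prest, Bool.eq_false_iff.mpr h]]
        exact le_trans (prest_len_le t (g ++ [m])) (by simp)

theorem buildRoundA_cons_eq (m : M4) (t : List M4) :
    buildRoundA (m :: t) = t.foldl roundStepA [m] := by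
  have h0 : roundStepA [] m = [m] := by simp [roundStepA, teamsA]
  simp [buildRoundA, List.foldl_cons, h0]

theorem removeAll_build (m : M4) (t : List M4) :
    removeAllA (m :: t) (buildRoundA (m :: t)) = prest [m] t := by
  rw [buildRoundA_cons_eq, sel_eq t [m]]
  have h1 : removeAllA (m :: t) ([m] ++ selDelta [m] t)
      = removeAllA t (selDelta [m] t) := by
    simp [removeAllA, List.foldl_cons]
  rw [h1, removeAll_selDelta t [m]]

theorem insertG_eq_roundsA_aux : ∀ (n : ℕ) (ms : List M4), ms.length ≤ n →
    ms.foldl (fun gs m => insertG m gs) [] = roundsA ms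
  | _, [], _ => by rw [roundsA]; rfl
  | 0, m :: t, h => by simp at h
  | n + 1, m :: t, h => by
      rw [roundsA]
      simp only [List.foldl_cons]
      have hi : insertG m ([] : List (List M4)) = [[m]] := rfl
      rw [hi, show ([[m]] : List (List M4)) = [m] :: [] from rfl, L1 t [m] []]
      rw [← buildRoundA_cons_eq, removeAll_build]
      have hlen : (prest [m] t).length ≤ n := le_trans (prest_len_le t [m]) (by simpa using h)
      rw [insertG_eq_roundsA_aux n (prest [m] t) hlen]

theorem allocLoopA_eq_enum_aux : ∀ (n : ℕ) (ms : List M4) (r : Int), ms.length ≤ n →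
    allocLoopA ms r = PySem.List.enumerate (roundsA ms) r
  | _, [], _, _ => by rw [allocLoopA, roundsA]; rfl
  | 0, m :: t, _, h => by simp at h
  | n + 1, m :: t, r, h => by
      rw [allocLoopA, roundsA, PySem.List.enumerate_cons]
      have hlt := removeAll_buildRound_lt m t
      have hlen : (removeAllA (m :: t) (buildRoundA (m :: t))).length ≤ n := by
        simp only [List.length_cons] at hlt h; omega
      rw [allocLoopA_eq_enum_aux n _ (r + 1) hlen]

theorem enum_stateOf : ∀ (gs : List (List M4)) (s r : Int),
    (PySem.List.enumerate (stateOf gs) s).map (fun p => (r + p.1, p.2.1))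
      = PySem.List.enumerate gs (r + s)
  | [], _, _ => rfl
  | g :: gs, s, r => by
      show (PySem.List.enumerate ((g, tset g) :: stateOf gs) s).map (fun p => (r + p.1, p.2.1))
        = PySem.List.enumerate (g :: gs) (r + s)
      rw [PySem.List.enumerate_cons, PySem.List.enumerate_cons, List.map_cons]
      rw [enum_stateOf gs (s + 1) r]
      have : r + (s + 1) = (r + s) + 1 := by ring
      rw [this]

-- ===== VERDICT (by name: the statement is the Claim_ definition above) =====
theorem allocate_matchups_py_spec : Claim_equal_allocate_matchups_py := by
  intro ms r _
  unfold Spec_allocate_matchups_py allocate_matchups_py allocate_matchups_py_alt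
  have h0 : ms.foldl (fun rs m => altInsert m rs) ([] : List (List M4 × PySem.Set String))
      = stateOf (ms.foldl (fun gs m => insertG m gs) []) := foldl_alt_state ms []
  rw [h0, insertG_eq_roundsA_aux ms.length ms le_rfl]
  have h1 := enum_stateOf (roundsA ms) 0 r
  rw [add_zero] at h1
  rw [h1, allocLoopA_eq_enum_aux ms.length ms r le_rfl]
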